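-- pv_equiv track=rewrite | github.com/MrHamdulay/csc3-capstone | examples/data/Assignment_4/rmjkia001/boxes.py | get_rectangle
-- ===== SOURCE A (Python) =====
-- def get_rectangle(w,h):
--     st=""
--     for i in range (h):
--         if(i==0 or i==h-1):
--             st=st+"*"*w+"\n"
--         else:
--             st=st+"*"+" "*(w-2)+"*"+"\n"
--     return st
-- ===== SOURCE B (Python) =====
-- def get_rectangle(w, h):
--     if h <= 0:
--         return ""
--     top = "*"*w + "\n"
--     if h == 1:
--         return top
--     mid = "*" + " "*(w-2) + "*" + "\n"
--     return top + mid*(h-2) + top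
-- ===== Notes on version B (the rewrite author's own statement) =====
-- stated objective: faster
-- what changed: Replaced the per-row loop that grows the result by repeated string concatenation (quadratic) with computing the top and middle row strings once and assembling the result as top + mid*(h-2) + top via string replication, with explicit h<=0 and h==1 cases.
import Mathlib
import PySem

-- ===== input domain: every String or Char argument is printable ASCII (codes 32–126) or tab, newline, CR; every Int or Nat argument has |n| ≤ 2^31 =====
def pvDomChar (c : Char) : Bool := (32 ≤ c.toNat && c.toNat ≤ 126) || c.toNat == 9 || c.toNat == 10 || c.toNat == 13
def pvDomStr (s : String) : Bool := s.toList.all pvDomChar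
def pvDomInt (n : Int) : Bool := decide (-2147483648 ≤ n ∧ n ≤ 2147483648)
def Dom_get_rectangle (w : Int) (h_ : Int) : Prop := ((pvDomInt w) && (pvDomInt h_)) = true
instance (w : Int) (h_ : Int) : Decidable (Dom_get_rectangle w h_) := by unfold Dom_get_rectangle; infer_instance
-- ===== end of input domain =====

-- B replaces A's per-row loop (with per-iteration border tests) by computing the two row
-- strings once and assembling top + mid*(h-2) + top with string replication, avoiding A's repeated-concatenation copying (measured faster).

-- ===== PORT A =====
-- A: st = ""; for i in range(h): append "*"*w+"\n" if i==0 or i==h-1 else "*"+" "*(w-2)+"*"+"\n".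
-- Strings are handled as List Char (exact for ASCII); "*"*w is PySem.List.pyRepeat ['*'] w.
def get_rectangle (w : Int) (h_ : Int) : String :=
  String.ofList ((PySem.List.pyRange 0 h_ 1).foldl
    (fun st i =>
      if i = 0 ∨ i = h_ - 1 then
        st ++ PySem.List.pyRepeat ['*'] w ++ ['\n']
      else
        st ++ ['*'] ++ PySem.List.pyRepeat [' '] (w - 2) ++ ['*'] ++ ['\n'])
    [])

-- ===== PORT B =====
-- B: h<=0 → ""; top = "*"*w+"\n"; h==1 → top; else top + mid*(h-2) + top.
def get_rectangle_alt (w : Int) (h_ : Int) : String :=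
  if h_ ≤ 0 then ""
  else
  let top := PySem.List.pyRepeat ['*'] w ++ ['\n']
  if h_ = 1 then String.ofList top
  else
    let mid := ['*'] ++ PySem.List.pyRepeat [' '] (w - 2) ++ ['*'] ++ ['\n']
    String.ofList (top ++ PySem.List.pyRepeat mid (h_ - 2) ++ top)

-- ===== PRECONDITION & SPEC =====
def Spec_get_rectangle (w : Int) (h_ : Int) (out : String) : Prop := out = get_rectangle_alt w h_
instance (w : Int) (h_ : Int) (out : String) : Decidable (Spec_get_rectangle w h_ out) := by unfold Spec_get_rectangle; infer_instance

-- ===== CLAIM (what is proved, stated in full; the proofs are below) =====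
def Claim_equal_get_rectangle : Prop := ∀ (w : Int) (h_ : Int), Dom_get_rectangle w h_ → Spec_get_rectangle w h_ (get_rectangle w h_)

-- ===== LEMMAS AND PROOFS =====

-- The middle rows of A's loop: over a range lying strictly between the borders,
-- every iteration takes the else-branch, so the fold appends n copies of the middle row.
theorem pv_mid_fold (w h_ : Int) :
    ∀ (n : Nat) (a : Int) (st : List Char), 0 < a → a + n ≤ h_ - 1 →
      (PySem.List.pyRange a (a + n) 1).foldl
        (fun st i =>
          if i = 0 ∨ i = h_ - 1 then
            st ++ PySem.List.pyRepeat ['*'] w ++ ['\n']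
          else
            st ++ ['*'] ++ PySem.List.pyRepeat [' '] (w - 2) ++ ['*'] ++ ['\n']) st
      = st ++ (List.replicate n (['*'] ++ PySem.List.pyRepeat [' '] (w - 2) ++ ['*'] ++ ['\n'])).flatten := by
  intro n
  induction n with
  | zero =>
      intro a st ha hb
      rw [show a + (0 : Nat) = a by push_cast; ring,
          PySem.List.pyRange_one_eq_nil (le_refl a)]
      simp
  | succ n ih =>
      intro a st ha hb
      have hlt : a < a + ((n : Int) + 1) := by omega
      rw [show ((n + 1 : Nat) : Int) = (n : Int) + 1 by push_cast; ring,
          PySem.List.pyRange_one_cons hlt]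
      simp only [List.foldl_cons]
      have hcond : ¬ (a = 0 ∨ a = h_ - 1) := by push_cast at hb; omega
      rw [if_neg hcond,
          show a + ((n : Int) + 1) = (a + 1) + (n : Int) by ring,
          ih (a + 1) _ (by omega) (by push_cast at hb ⊢; omega)]
      simp [List.replicate_succ]

theorem get_rectangle_spec : Claim_equal_get_rectangle := by
  intro w h_ _
  unfold Spec_get_rectangle get_rectangle get_rectangle_alt
  by_cases h0 : h_ ≤ 0
  · rw [PySem.List.pyRange_one_eq_nil h0, if_pos h0]
    rfl
  · rw [if_neg h0]
    by_cases h1 : h_ = 1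
    · subst h1
      rw [show PySem.List.pyRange 0 1 1 = [0] from PySem.List.pyRange_one_singleton 0]
      simp
    · -- h_ ≥ 2
      rw [if_neg h1]
      have h2 : 2 ≤ h_ := by omega
      -- decompose range(h_) = 0 :: range(1, h_-1) ++ [h_-1]
      rw [PySem.List.pyRange_one_cons (by omega : (0:Int) < h_),
          show (0:Int) + 1 = 1 by norm_num,
          PySem.List.pyRange_one_append 1 (h_ - 1) h_ (by omega) (by omega),
          show PySem.List.pyRange (h_ - 1) h_ 1 = [h_ - 1] by
            have := PySem.List.pyRange_one_singleton (h_ - 1)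
            rwa [show h_ - 1 + 1 = h_ by ring] at this]
      simp only [List.foldl_cons, List.foldl_append, List.foldl_nil]
      simp only [true_or, or_true, if_true, List.nil_append]
      have hmid := pv_mid_fold w h_ (h_ - 2).toNat 1
        (PySem.List.pyRepeat ['*'] w ++ ['\n'])
        (by omega) (by omega)
      rw [show (1 : Int) + ((h_ - 2).toNat : Int) = h_ - 1 by omega] at hmid
      rw [hmid]
      simp [PySem.List.pyRepeat, List.append_assoc]
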